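-- pv_equiv track=rewrite | github.com/clee421/advent-of-code | 2023/day01/run.py | find_start_num
-- ===== SOURCE A (Python) =====
-- NUM_MAP = {
--     "one": "1",
--     "two": "2",
--     "three": "3",
--     "four": "4",
--     "five": "5",
--     "six": "6",
--     "seven": "7",
--     "eight": "8",
--     "nine": "9",
-- }
--
-- def find_start_num(text: str) -> str:
--     min_index = len(text)
--     min_value = None
--     for s in range(len(text)):
--         if text[s].isdigit():
--             min_index = s
--             min_value = text[s]
--             break
--
--     for word_num in [
--         "one",
--         "two",
--         "three",
--         "four",
--         "five",
--         "six",
--         "seven",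
--         "eight",
--         "nine",
--     ]:
--         w_index = text.find(word_num)
--         if w_index != -1 and w_index < min_index:
--             min_index = w_index
--             min_value = NUM_MAP[word_num]
--
--     return min_value
-- ===== SOURCE B (Python) =====
-- NUM_MAP = {
--     "one": "1",
--     "two": "2",
--     "three": "3",
--     "four": "4",
--     "five": "5",
--     "six": "6",
--     "seven": "7",
--     "eight": "8",
--     "nine": "9",
-- }
--
-- def find_start_num(text: str) -> str:
--     # single left-to-right positional scan: first digit or number-word wins
--     for i in range(len(text)):
--         if text[i].isdigit():
--             return text[i]
--         for word, digit in NUM_MAP.items():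
--             if text.startswith(word, i):
--                 return digit
--     return None
-- ===== Notes on version B (the rewrite author's own statement) =====
-- stated objective: alternative
-- what changed: A scans once for the first digit and then runs nine separate str.find scans, keeping a running minimum; B makes a single left-to-right positional scan that returns the first digit or number-word prefix it meets.
import Mathlib
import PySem

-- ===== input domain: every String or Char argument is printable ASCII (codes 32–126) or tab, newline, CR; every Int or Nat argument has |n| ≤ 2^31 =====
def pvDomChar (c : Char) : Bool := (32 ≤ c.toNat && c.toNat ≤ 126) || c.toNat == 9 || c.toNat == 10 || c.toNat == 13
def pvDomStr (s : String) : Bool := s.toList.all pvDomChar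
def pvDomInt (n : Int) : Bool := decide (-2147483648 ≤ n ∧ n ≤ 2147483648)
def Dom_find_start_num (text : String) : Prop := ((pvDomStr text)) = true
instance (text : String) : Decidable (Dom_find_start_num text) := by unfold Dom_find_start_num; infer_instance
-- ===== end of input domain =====

-- B replaces A's digit loop + nine separate str.find scans by one left-to-right
-- positional scan returning the first digit or number-word match (objective: alternative).


-- ===== PORT A =====
def pvNUM_MAP : PySem.Dict String String :=
  PySem.Dict.mk [("one","1"),("two","2"),("three","3"),("four","4"),("five","5"),
                 ("six","6"),("seven","7"),("eight","8"),("nine","9")]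

def pvWordList : List String :=
  ["one","two","three","four","five","six","seven","eight","nine"]

-- the first for-loop with break: first digit and its index, scanning positions left to right
def pvDigitScan : List Char → Nat → Option (Nat × Char)
  | [], _ => none
  | c :: cs, s => if PySem.Chars.isdigit c then some (s, c) else pvDigitScan cs (s + 1)

def find_start_num (text : String) : Option String :=
  (pvWordList.foldl (fun (acc : Int × Option String) w =>
      let wi := PySem.Chars.find text.toList w.toList
      if wi ≠ -1 ∧ wi < acc.1 then (wi, some (pvNUM_MAP.getD w "")) else acc)
    (match pvDigitScan text.toList 0 with
     | some p => ((p.1 : Int), some (String.ofList [p.2]))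
     | none => ((text.toList.length : Int), none))).2

-- ===== PORT B =====
def pvPairs : List (String × String) :=
  [("one","1"),("two","2"),("three","3"),("four","4"),("five","5"),
   ("six","6"),("seven","7"),("eight","8"),("nine","9")]

-- inner loop of B: first pair whose word starts here
def pvTryWords (l : List Char) : List (String × String) → Option String
  | [] => none
  | p :: ps => if PySem.Chars.startswith l p.1.toList then some p.2 else pvTryWords l ps

-- outer loop of B: scan positions left to right
def pvScan : List Char → Option String
  | [] => none
  | c :: cs =>
    if PySem.Chars.isdigit c then some (String.ofList [c])
    else
      match pvTryWords (c :: cs) pvPairs with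
      | some v => some v
      | none => pvScan cs

def find_start_num_alt (text : String) : Option String := pvScan text.toList

-- ===== PRECONDITION & SPEC =====
def Spec_find_start_num (text : String) (out : Option String) : Prop := out = find_start_num_alt text
instance (text : String) (out : Option String) : Decidable (Spec_find_start_num text out) := by unfold Spec_find_start_num; infer_instance

-- ===== CLAIM (what is proved, stated in full; the proofs are below) =====
def Claim_equal_find_start_num : Prop := ∀ (text : String), Dom_find_start_num text → Spec_find_start_num text (find_start_num text)

-- ===== LEMMAS AND PROOFS =====

-- A's fold body, named for the lemmas
def pvStep (l : List Char) (acc : Int × Option String) (p : String × String) : Int × Option String :=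
  if PySem.Chars.find l p.1.toList ≠ -1 ∧ PySem.Chars.find l p.1.toList < acc.1
  then (PySem.Chars.find l p.1.toList, some p.2) else acc

-- uniqueness characterisation of Chars.find
theorem pv_find_unique (s w : List Char) (n : Int) (hn : 0 ≤ n)
    (hp : w <+: s.drop n.toNat) (hmin : ∀ i < n.toNat, ¬ w <+: s.drop i) :
    PySem.Chars.find s w = n := by
  have hinf : w <:+: s := hp.isInfix.trans (List.drop_suffix _ _).isInfix
  have hnn : 0 ≤ PySem.Chars.find s w := (PySem.Chars.find_nonneg_iff s w).2 hinf
  obtain ⟨hfp, hfmin⟩ := PySem.Chars.find_spec (s := s) (sub := w) hnn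
  rcases lt_trichotomy (PySem.Chars.find s w).toNat n.toNat with h | h | h
  · exact absurd hfp (hmin _ h)
  · omega
  · exact absurd hp (hfmin _ h)

-- how find unfolds over a cons cell
theorem pv_find_cons (c : Char) (cs : List Char) (w : List Char) :
    PySem.Chars.find (c :: cs) w =
      if PySem.Chars.startswith (c :: cs) w then 0
      else if PySem.Chars.find cs w = -1 then -1
      else PySem.Chars.find cs w + 1 := by
  by_cases hsw : PySem.Chars.startswith (c :: cs) w = true
  · simp only [hsw, if_true]
    exact pv_find_unique _ _ 0 le_rfl (by simpa using (PySem.Chars.startswith_iff _ _).1 hsw)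
      (by omega)
  · rw [if_neg hsw]
    by_cases hf : PySem.Chars.find cs w = -1
    · simp only [hf, if_true]
      rw [PySem.Chars.find_eq_neg_one_iff]
      intro hinf
      rcases List.infix_cons_iff.1 hinf with hpre | hinf'
      · exact hsw ((PySem.Chars.startswith_iff _ _).2 hpre)
      · exact (PySem.Chars.find_eq_neg_one_iff cs w).1 hf hinf'
    · simp only [hf, if_false]
      have hge : -1 ≤ PySem.Chars.find cs w := PySem.Chars.neg_one_le_find cs w
      have hnn : 0 ≤ PySem.Chars.find cs w := by omega
      obtain ⟨hfp, hfmin⟩ := PySem.Chars.find_spec (s := cs) (sub := w) hnn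
      refine pv_find_unique _ _ _ (by omega) ?_ ?_
      · have : ((PySem.Chars.find cs w + 1).toNat) = (PySem.Chars.find cs w).toNat + 1 := by omega
        simpa [this] using hfp
      · intro i hi
        match i with
        | 0 => simpa using fun h => hsw ((PySem.Chars.startswith_iff _ _).2 h)
        | j + 1 =>
          have : j < (PySem.Chars.find cs w).toNat := by omega
          simpa using hfmin j this

-- once the running minimum is ≤ 0, the fold never updates
theorem pv_fold_keep (l : List Char) (ws : List (String × String))
    (acc : Int × Option String) (h : acc.1 ≤ 0) :
    ws.foldl (pvStep l) acc = acc := by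
  induction ws generalizing acc with
  | nil => rfl
  | cons p ps ih =>
    have hge : -1 ≤ PySem.Chars.find l p.1.toList := PySem.Chars.neg_one_le_find _ _
    have : pvStep l acc p = acc := by
      unfold pvStep
      split
      · omega
      · rfl
    simp [List.foldl_cons, this, ih acc h]

-- when some word matches at position 0, the fold lands on the first such word's value
theorem pv_fold_hit (l : List Char) (ws : List (String × String)) (d : String)
    (acc : Int × Option String) (hacc : 1 ≤ acc.1)
    (H : ∀ p ∈ ws, (PySem.Chars.find l p.1.toList = 0 ↔ PySem.Chars.startswith l p.1.toList = true))
    (hhit : pvTryWords l ws = some d) :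
    (ws.foldl (pvStep l) acc).2 = some d := by
  induction ws generalizing acc with
  | nil => simp [pvTryWords] at hhit
  | cons p ps ih =>
    by_cases hsw : PySem.Chars.startswith l p.1.toList = true
    · have hf : PySem.Chars.find l p.1.toList = 0 := (H p (by simp)).2 hsw
      have hd : p.2 = d := by simpa [pvTryWords, hsw] using hhit
      have hstep : pvStep l acc p = (0, some p.2) := by
        unfold pvStep; rw [hf, if_pos ⟨by omega, by omega⟩]
      rw [List.foldl_cons, hstep, pv_fold_keep l ps _ (by simp)]
      simp [hd]
    · have hhit' : pvTryWords l ps = some d := by simpa [pvTryWords, hsw] using hhit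
      have hne : PySem.Chars.find l p.1.toList ≠ 0 := fun h => hsw ((H p (by simp)).1 h)
      have hge : -1 ≤ PySem.Chars.find l p.1.toList := PySem.Chars.neg_one_le_find _ _
      have H' : ∀ q ∈ ps, (PySem.Chars.find l q.1.toList = 0 ↔ PySem.Chars.startswith l q.1.toList = true) :=
        fun q hq => H q (by simp [hq])
      rw [List.foldl_cons]
      unfold pvStep
      split
      · exact ih _ (by omega) H' hhit'
      · exact ih _ hacc H' hhit'

-- shift x = how find over c::cs relates to find over cs when the word does not start at 0
theorem pv_fold_shift (c : Char) (cs : List Char) (ws : List (String × String))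
    (hno : ∀ p ∈ ws, PySem.Chars.startswith (c :: cs) p.1.toList = false)
    (k : Int) (v : Option String) :
    (ws.foldl (pvStep (c :: cs)) (k + 1, v)) =
      ((ws.foldl (pvStep cs) (k, v)).1 + 1, (ws.foldl (pvStep cs) (k, v)).2) := by
  induction ws generalizing k v with
  | nil => rfl
  | cons p ps ih =>
    have hsw := hno p (by simp)
    have hcons := pv_find_cons c cs p.1.toList
    rw [hsw] at hcons
    simp only [Bool.false_eq_true, if_false] at hcons
    have hge : -1 ≤ PySem.Chars.find cs p.1.toList := PySem.Chars.neg_one_le_find _ _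
    have hno' : ∀ q ∈ ps, PySem.Chars.startswith (c :: cs) q.1.toList = false :=
      fun q hq => hno q (by simp [hq])
    rw [List.foldl_cons, List.foldl_cons]
    by_cases hf : PySem.Chars.find cs p.1.toList = -1
    · rw [hf] at hcons
      simp only [if_pos rfl] at hcons
      have h1 : pvStep (c :: cs) (k + 1, v) p = (k + 1, v) := by
        unfold pvStep; rw [hcons]; simp
      have h2 : pvStep cs (k, v) p = (k, v) := by
        unfold pvStep; rw [hf]; simp
      rw [h1, h2]; exact ih hno' k v
    · rw [if_neg hf] at hcons
      by_cases hlt : PySem.Chars.find cs p.1.toList < k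
      · have h1 : pvStep (c :: cs) (k + 1, v) p = (PySem.Chars.find cs p.1.toList + 1, some p.2) := by
          unfold pvStep; rw [hcons]; simp only [Prod.fst]
          rw [if_pos ⟨by omega, by omega⟩]
        have h2 : pvStep cs (k, v) p = (PySem.Chars.find cs p.1.toList, some p.2) := by
          unfold pvStep; simp only [Prod.fst]
          rw [if_pos ⟨hf, hlt⟩]
        rw [h1, h2]; exact ih hno' _ _
      · have h1 : pvStep (c :: cs) (k + 1, v) p = (k + 1, v) := by
          unfold pvStep; rw [hcons]; simp only [Prod.fst]
          rw [if_neg (by omega)]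
        have h2 : pvStep cs (k, v) p = (k, v) := by
          unfold pvStep; simp only [Prod.fst]
          rw [if_neg (by push_neg; intro _; omega)]
        rw [h1, h2]; exact ih hno' k v

-- tryWords = none means no word starts here
theorem pv_try_none (l : List Char) (ws : List (String × String))
    (h : pvTryWords l ws = none) :
    ∀ p ∈ ws, PySem.Chars.startswith l p.1.toList = false := by
  induction ws with
  | nil => simp
  | cons p ps ih =>
    by_cases hsw : PySem.Chars.startswith l p.1.toList = true
    · simp [pvTryWords, hsw] at h
    · intro q hq
      rcases List.mem_cons.1 hq with hq1 | hq2
      · subst hq1; simpa using hsw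
      · exact ih (by simpa [pvTryWords, hsw] using h) q hq2

-- the digit scan with offset s + 1 is the scan with offset s, shifted
theorem pv_digit_shift (cs : List Char) (s : Nat) :
    pvDigitScan cs (s + 1) = (pvDigitScan cs s).map (fun p => (p.1 + 1, p.2)) := by
  induction cs generalizing s with
  | nil => rfl
  | cons c cs ih =>
    by_cases hd : PySem.Chars.isdigit c = true
    · simp [pvDigitScan, hd]
    · simp [pvDigitScan, hd, ih]

-- A's word fold is the pair fold with pvStep
theorem pv_fold_eq (l : List Char) (init : Int × Option String) :
    pvWordList.foldl (fun (acc : Int × Option String) w =>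
        let wi := PySem.Chars.find l w.toList
        if wi ≠ -1 ∧ wi < acc.1 then (wi, some (pvNUM_MAP.getD w "")) else acc) init
      = pvPairs.foldl (pvStep l) init := by
  have : pvWordList = pvPairs.map Prod.fst := by decide
  rw [this, List.foldl_map]
  refine PySem.List.foldl_congr_mem _ _ _ _ ?_
  intro acc p hp
  have : pvNUM_MAP.getD p.1 "" = p.2 := by
    fin_cases hp <;> decide
  simp [pvStep, this]

-- core of A, on the character list
def pvAval (l : List Char) : Int × Option String :=
  pvPairs.foldl (pvStep l)
    (match pvDigitScan l 0 with
     | some p => ((p.1 : Int), some (String.ofList [p.2]))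
     | none => ((l.length : Int), none))

theorem pv_main (l : List Char) : (pvAval l).2 = pvScan l := by
  induction l with
  | nil =>
    simp only [pvAval, pvDigitScan]
    rw [pv_fold_keep _ _ _ (by simp)]
    rfl
  | cons c cs ih =>
    by_cases hd : PySem.Chars.isdigit c = true
    · simp only [pvAval, pvDigitScan, hd, if_pos]
      rw [pv_fold_keep _ _ _ (by simp)]
      simp [pvScan, hd]
    · have hinit : (match pvDigitScan (c :: cs) 0 with
          | some p => ((p.1 : Int), some (String.ofList [p.2]))
          | none => (((c :: cs).length : Int), none)) =
          ((match pvDigitScan cs 0 with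
            | some p => ((p.1 : Int), some (String.ofList [p.2]))
            | none => ((cs.length : Int), none) : Int × Option String).1 + 1,
           (match pvDigitScan cs 0 with
            | some p => ((p.1 : Int), some (String.ofList [p.2]))
            | none => ((cs.length : Int), none) : Int × Option String).2) := by
        simp only [pvDigitScan, hd, if_neg, Bool.false_eq_true]
        rw [pv_digit_shift cs 0]
        cases pvDigitScan cs 0 with
        | none => simp
        | some p => simp
      cases htry : pvTryWords (c :: cs) pvPairs with
      | some d =>
        have H : ∀ p ∈ pvPairs, (PySem.Chars.find (c :: cs) p.1.toList = 0 ↔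
            PySem.Chars.startswith (c :: cs) p.1.toList = true) := by
          intro p _
          rw [pv_find_cons]
          by_cases hsw : PySem.Chars.startswith (c :: cs) p.1.toList = true
          · simp [hsw]
          · have hge : -1 ≤ PySem.Chars.find cs p.1.toList := PySem.Chars.neg_one_le_find _ _
            simp only [hsw, Bool.false_eq_true, if_false]
            constructor
            · intro h
              split at h <;> omega
            · exact fun h => False.elim h
        unfold pvAval
        rw [hinit]
        have hpos : 0 ≤ (match pvDigitScan cs 0 with
            | some p => ((p.1 : Int), some (String.ofList [p.2]))
            | none => ((cs.length : Int), none) : Int × Option String).1 := by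
          cases pvDigitScan cs 0 with
          | none => simp
          | some p => simp
        rw [pv_fold_hit (c :: cs) pvPairs d _ (by omega) H htry]
        simp [pvScan, hd, htry]
      | none =>
        have hno := pv_try_none _ _ htry
        unfold pvAval
        rw [hinit, pv_fold_shift c cs pvPairs hno]
        simp only [pvScan, hd, Bool.false_eq_true, if_false, htry]
        exact ih

-- ===== VERDICT (by name: the statement is the Claim_ definition above) =====
theorem find_start_num_spec : Claim_equal_find_start_num := by
  intro text _
  unfold Spec_find_start_num find_start_num find_start_num_alt
  rw [pv_fold_eq]
  exact pv_main text.toList
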